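-- pv_equiv track=rewrite | github.com/kovr-ai/kovr-resource-collector | llm_generator_v2/checks_with_python_logic/validate_with_mock_data/services.py | _parse_field_path
-- ===== SOURCE A (Python) =====
-- from typing import Any, Dict, List
--
-- def _parse_field_path(field_path: str) -> List[str]:
--     """Parse field path into components"""
--     # Simple parsing - can be enhanced
--     parts = []
--     current_part = ""
--
--     i = 0
--     while i < len(field_path):
--         char = field_path[i]
--
--         if char == '.':
--             if current_part:
--                 parts.append(current_part)
--                 current_part = ""
--         elif char == '[':
--             if current_part:
--                 parts.append(current_part)
--                 current_part = ""
--             # Find closing bracket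
--             j = i + 1
--             while j < len(field_path) and field_path[j] != ']':
--                 j += 1
--
--             if j < len(field_path):
--                 bracket_content = field_path[i+1:j]
--                 if bracket_content == '*' or bracket_content == '':
--                     parts.append('[]')
--                 else:
--                     parts.append(bracket_content)
--                 i = j
--         else:
--             current_part += char
--
--         i += 1
--
--     if current_part:
--         parts.append(current_part)
--
--     return parts
-- ===== SOURCE B (Python) =====
-- import re
-- from typing import Any, Dict, List
--
-- # Regex tokenizer: one pass over finditer matches instead of a per-character
-- # accumulator scan.  The bracket alternative is tried first; a plain segment is
-- # a maximal run of characters other than '.' and '['; anything else ('.', or a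
-- # '[' with no closing ']' ahead) is simply skipped by finditer.
-- _TOKEN = re.compile(r'\[([^\]]*)\]|([^.\[]+)')
--
--
-- def _parse_field_path(field_path: str) -> List[str]:
--     parts = []
--     for m in _TOKEN.finditer(field_path):
--         bracket = m.group(1)
--         if bracket is not None:
--             parts.append('[]' if bracket in ('', '*') else bracket)
--         else:
--             parts.append(m.group(2))
--     return parts
-- ===== Notes on version B (the rewrite author's own statement) =====
-- stated objective: faster
-- what changed: Replaced A's index-and-accumulator character scan (per-character string concatenation and a manual inner while to find ']') by a compiled-regex tokenizer that walks finditer matches and maps each whole token to its component.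
import Mathlib
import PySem

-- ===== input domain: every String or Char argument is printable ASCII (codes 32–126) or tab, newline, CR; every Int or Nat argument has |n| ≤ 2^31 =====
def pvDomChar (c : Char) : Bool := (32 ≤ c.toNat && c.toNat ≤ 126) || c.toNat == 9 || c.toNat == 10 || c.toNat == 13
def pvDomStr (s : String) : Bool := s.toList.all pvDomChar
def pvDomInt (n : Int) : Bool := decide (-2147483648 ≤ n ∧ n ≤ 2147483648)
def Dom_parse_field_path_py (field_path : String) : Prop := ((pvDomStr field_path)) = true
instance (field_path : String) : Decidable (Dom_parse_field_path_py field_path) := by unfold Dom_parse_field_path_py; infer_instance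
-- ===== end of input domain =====

-- B replaces A's index-and-accumulator character scan by a regex-style tokenizer
-- (ported by hand as a token-at-a-time recursion); measured faster: no per-char concatenation.

-- ===== PORT A =====
-- inner `while j < len(field_path) and field_path[j] != ']': j += 1`
def pvFindClose (cs : List Char) (j : Nat) : Nat :=
  if h : j < cs.length then
    if cs[j] = ']' then j else pvFindClose cs (j + 1)
  else j
termination_by cs.length - j

-- the port cites this in its decreasing_by, so it stays above the port
theorem pvFindClose_ge (cs : List Char) (j : Nat) : j ≤ pvFindClose cs j := by
  unfold pvFindClose
  split
  · split
    · exact le_refl _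
    · exact le_trans (Nat.le_succ j) (pvFindClose_ge cs (j + 1))
  · exact le_refl _
termination_by cs.length - j

-- the `while i < len(field_path)` loop: state = (i, current_part, parts)
def pvALoop (cs : List Char) (i : Nat) (current : List Char) (parts : List String) : List String :=
  if h : i < cs.length then
    let c := cs[i]
    if c = '.' then
      pvALoop cs (i + 1) [] (if current ≠ [] then parts ++ [String.ofList current] else parts)
    else if c = '[' then
      let parts' := if current ≠ [] then parts ++ [String.ofList current] else parts
      let j := pvFindClose cs (i + 1)
      if hj : j < cs.length then
        let content := PySem.List.slice cs (some ((i : Int) + 1)) (some (j : Int))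
        pvALoop cs (j + 1) []
          (if content = ['*'] ∨ content = [] then parts' ++ ["[]"]
           else parts' ++ [String.ofList content])
      else
        pvALoop cs (i + 1) [] parts'
    else
      pvALoop cs (i + 1) (current ++ [c]) parts
  else
    if current ≠ [] then parts ++ [String.ofList current] else parts
termination_by cs.length - i
decreasing_by
  · omega
  · have := pvFindClose_ge cs (i + 1); omega
  · omega
  · omega

def parse_field_path_py (field_path : String) : List String :=
  pvALoop field_path.toList 0 [] []

-- ===== PORT B =====
-- a character that may appear in a plain segment: the regex class [^.\[]
def pvNonspec (c : Char) : Bool := !(c = '.' || c = '[')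

-- Hand-port of Source B's finditer loop over the pattern  \[([^\]]*)\]|([^.\[]+) ,
-- exact for this pattern: at each position try the bracket alternative first
-- (a '[' with a ']' ahead), else a maximal run of non-'.'/'[' characters,
-- else finditer advances one character.
def pvBTokens : List Char → List String
  | [] => []
  | c :: rest =>
    if c = '[' then
      let content := rest.takeWhile (· ≠ ']')
      if content.length < rest.length then
        (if content = [] ∨ content = ['*'] then "[]" else String.ofList content)
          :: pvBTokens (rest.drop (content.length + 1))
      else
        pvBTokens rest
    else if c = '.' then
      pvBTokens rest
    else
      let seg := rest.takeWhile pvNonspec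
      String.ofList (c :: seg) :: pvBTokens (rest.drop seg.length)
termination_by cs => cs.length
decreasing_by
  all_goals simp

def parse_field_path_py_alt (field_path : String) : List String :=
  pvBTokens field_path.toList

-- ===== PRECONDITION & SPEC =====
def Spec_parse_field_path_py (field_path : String) (out : List String) : Prop := out = parse_field_path_py_alt field_path
instance (field_path : String) (out : List String) : Decidable (Spec_parse_field_path_py field_path out) := by unfold Spec_parse_field_path_py; infer_instance

-- ===== CLAIM (what is proved, stated in full; the proofs are below) =====
def Claim_equal_parse_field_path_py : Prop := ∀ (field_path : String), Dom_parse_field_path_py field_path → Spec_parse_field_path_py field_path (parse_field_path_py field_path)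

-- ===== LEMMAS AND PROOFS =====

theorem pvFindClose_eq (cs : List Char) (j : Nat) :
    pvFindClose cs j = j + ((cs.drop j).takeWhile (· ≠ ']')).length := by
  rw [pvFindClose]
  split
  · rename_i h
    rw [List.drop_eq_getElem_cons h, List.takeWhile_cons]
    split
    · rename_i hc
      simp [hc]
    · rename_i hc
      rw [pvFindClose_eq cs (j + 1)]
      simp [hc]
      omega
  · rename_i h
    rw [List.drop_eq_nil_of_le (by omega)]
    simp
termination_by cs.length - j

-- emitting a finished segment: tokens of (cur ++ l) when l cannot extend cur
theorem pvBTokens_emit (cur l : List Char) (hcur : cur.all pvNonspec)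
    (hl : ∀ d r', l = d :: r' → pvNonspec d = false) :
    pvBTokens (cur ++ l) = (if cur = [] then [] else [String.ofList cur]) ++ pvBTokens l := by
  cases cur with
  | nil => simp
  | cons c0 cur' =>
    simp only [List.all_cons, Bool.and_eq_true] at hcur
    have h0 : pvNonspec c0 = true := hcur.1
    have hb : c0 ≠ '[' := by intro h; rw [h] at h0; simp [pvNonspec] at h0
    have hd : c0 ≠ '.' := by intro h; rw [h] at h0; simp [pvNonspec] at h0
    have htwl : l.takeWhile pvNonspec = [] := by
      cases l with
      | nil => rfl
      | cons d r' => simp [hl d r' rfl]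
    rw [List.cons_append, pvBTokens]
    simp only [hb, hd, if_false]
    have hall : cur'.takeWhile pvNonspec = cur' := by
      simp [List.takeWhile_eq_self_iff]
      exact List.all_eq_true.mp hcur.2
    have htw : (cur' ++ l).takeWhile pvNonspec = cur' := by
      rw [List.takeWhile_append, if_pos (by rw [hall]), htwl]
      simp
    rw [htw]
    have hdrop : (cur' ++ l).drop cur'.length = l := List.drop_left
    rw [hdrop]
    simp

theorem pvMain (cs : List Char) : ∀ (n i : Nat) (cur : List Char) (parts : List String),
    cs.length - i = n → cur.all pvNonspec →
    pvALoop cs i cur parts = parts ++ pvBTokens (cur ++ cs.drop i) := by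
  intro n
  induction n using Nat.strong_induction_on with
  | _ n ih =>
    intro i cur parts hn hcur
    by_cases h : i < cs.length
    · have hdropi : cs.drop i = cs[i] :: cs.drop (i + 1) := List.drop_eq_getElem_cons h
      rw [pvALoop]
      simp only [h, dif_pos]
      by_cases hdot : cs[i] = '.'
      · rw [if_pos hdot]
        rw [ih (cs.length - (i + 1)) (by omega) (i + 1) [] _ rfl (by simp)]
        rw [hdropi, hdot]
        rw [pvBTokens_emit cur ('.' :: cs.drop (i + 1)) hcur
          (by intro d r' hdr; cases hdr; simp [pvNonspec])]
        have : pvBTokens ('.' :: cs.drop (i + 1)) = pvBTokens (cs.drop (i + 1)) := by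
          rw [pvBTokens]; simp
        rw [this]
        by_cases hc : cur = [] <;> simp [hc]
      · by_cases hbr : cs[i] = '['
        · rw [if_neg hdot, if_pos hbr]
          have hemit := pvBTokens_emit cur ('[' :: cs.drop (i + 1)) hcur
            (by intro d r' hdr; cases hdr; simp [pvNonspec])
          set rest := cs.drop (i + 1) with hrest
          set tw := rest.takeWhile (· ≠ ']') with htw
          have hrestlen : rest.length = cs.length - (i + 1) := by simp [hrest]
          have hfc : pvFindClose cs (i + 1) = i + 1 + tw.length := by
            rw [pvFindClose_eq]
          have htwle : tw.length ≤ rest.length := (List.takeWhile_prefix _).length_le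
          by_cases hj : pvFindClose cs (i + 1) < cs.length
          · -- closing bracket found
            have hlt : tw.length < rest.length := by omega
            have hslice : PySem.List.slice cs (some ((i : Int) + 1)) (some ((pvFindClose cs (i + 1) : Nat) : Int)) = tw := by
              have : ((i : Int) + 1) = ((i + 1 : Nat) : Int) := by push_cast; ring
              rw [this, PySem.List.slice_natCast]
              rw [hfc, ← hrest]
              have : i + 1 + tw.length - (i + 1) = tw.length := by omega
              rw [this]
              obtain ⟨t, ht⟩ := List.takeWhile_prefix (l := rest) (p := (· ≠ ']'))
              conv_lhs => rw [← ht]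
              exact List.take_left' rfl
            simp only [hj, dif_pos, hslice]
            rw [ih (cs.length - (pvFindClose cs (i + 1) + 1)) (by omega) _ [] _ rfl (by simp)]
            have hdropj : cs.drop (pvFindClose cs (i + 1) + 1) = rest.drop (tw.length + 1) := by
              rw [hfc, hrest, List.drop_drop]
              congr 1
            rw [hdropj, hdropi, hbr, hemit]
            have hbtok : pvBTokens ('[' :: rest) =
                (if tw = [] ∨ tw = ['*'] then "[]" else String.ofList tw)
                  :: pvBTokens (rest.drop (tw.length + 1)) := by
              rw [pvBTokens]
              simp only [← htw]
              simp [hlt]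
            rw [hbtok]
            have horder : (tw = ['*'] ∨ tw = []) ↔ (tw = [] ∨ tw = ['*']) := by tauto
            by_cases hc : cur = [] <;> by_cases hstar : tw = [] ∨ tw = ['*'] <;>
              simp [hc, horder.mpr, hstar, horder]
          · -- no closing bracket
            simp only [hj, dif_neg, not_false_iff]
            rw [ih (cs.length - (i + 1)) (by omega) (i + 1) [] _ rfl (by simp)]
            rw [hdropi, hbr, hemit]
            have hge : rest.length ≤ tw.length := by omega
            have hbtok : pvBTokens ('[' :: rest) = pvBTokens rest := by
              rw [pvBTokens]
              simp only [← htw]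
              have : ¬ tw.length < rest.length := by omega
              simp [this]
            rw [hbtok]
            by_cases hc : cur = [] <;> simp [hc, hrest]
        · rw [if_neg hdot, if_neg hbr]
          rw [ih (cs.length - (i + 1)) (by omega) (i + 1) (cur ++ [cs[i]]) _ rfl
            (by simp [hcur]; simp [pvNonspec, hdot, hbr])]
          rw [hdropi]
          congr 2
          simp
    · rw [pvALoop]
      simp only [h, dif_neg, not_false_iff]
      rw [List.drop_eq_nil_of_le (by omega)]
      rw [pvBTokens_emit cur [] hcur (by intro d r' hdr; cases hdr)]
      cases cur <;> simp [pvBTokens]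

-- ===== VERDICT (by name: the statement is the Claim_ definition above) =====
theorem parse_field_path_py_spec : Claim_equal_parse_field_path_py := by
  intro s _
  unfold Spec_parse_field_path_py parse_field_path_py parse_field_path_py_alt
  rw [pvMain s.toList (s.toList.length - 0) 0 [] [] rfl (by simp)]
  simp
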